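-- pv_equiv track=rewrite | github.com/tuxmai/ragflow | api/apps/sdk/session_refactored.py | _process_openai_messages
-- ===== SOURCE A (Python) =====
-- from typing import Any, Dict, Generator, List, Optional, Tuple
--
-- def _process_openai_messages(messages: List[Dict[str, Any]]) -> List[Dict[str, Any]]:
--     """Process OpenAI messages format."""
--     processed_messages = []
--
--     for message in messages:
--         if message["role"] == "system":
--             continue
--         if message["role"] == "assistant" and not processed_messages:
--             continue
--         processed_messages.append(message)
--
--     return processed_messages
-- ===== SOURCE B (Python) =====
-- from typing import Any, Dict, List
--
-- def _process_openai_messages(messages: List[Dict[str, Any]]) -> List[Dict[str, Any]]: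
--     """Process OpenAI messages format: drop system messages, then the leading assistant run."""
--     filtered = [m for m in messages if m["role"] != "system"]
--     i = 0
--     while i < len(filtered) and filtered[i]["role"] == "assistant":
--         i += 1
--     return filtered[i:]
-- ===== Notes on version B (the rewrite author's own statement) =====
-- stated objective: simpler
-- what changed: Replaced the single stateful accumulator loop (whose emptiness doubles as a 'seen real content yet' flag) by two plain passes: a comprehension filtering out system messages, then an index scan that drops the leading run of assistant messages by slicing.
import Mathlib
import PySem

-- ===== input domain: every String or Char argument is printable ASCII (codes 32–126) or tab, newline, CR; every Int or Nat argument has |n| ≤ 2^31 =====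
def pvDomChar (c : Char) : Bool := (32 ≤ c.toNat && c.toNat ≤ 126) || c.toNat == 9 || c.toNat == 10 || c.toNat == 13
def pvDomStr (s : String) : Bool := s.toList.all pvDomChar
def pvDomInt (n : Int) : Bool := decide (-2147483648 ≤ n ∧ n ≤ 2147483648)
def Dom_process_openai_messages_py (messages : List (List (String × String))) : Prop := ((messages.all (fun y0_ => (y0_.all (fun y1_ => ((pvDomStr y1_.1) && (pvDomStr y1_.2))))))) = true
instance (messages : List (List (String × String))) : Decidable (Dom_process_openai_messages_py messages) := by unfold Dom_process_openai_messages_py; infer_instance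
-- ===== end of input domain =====

-- B replaces A's single stateful loop (accumulator emptiness as a flag) by two passes —
-- filter out system messages, then drop the leading assistant run by index+slice — for simplicity.


-- role lookup m["role"] (first match = Python dict built from this assoc list); "" is never hit inside Pre_
def pvRole (m : List (String × String)) : String := PySem.Dict.getD (PySem.Dict.mk m) "role" ""

-- ===== PORT A =====
-- A: one loop, accumulator 'processed'; skip system; skip assistant while 'processed' is empty.
def process_openai_messages_py (messages : List (List (String × String))) : List (List (String × String)) :=
  messages.foldl
    (fun processed m =>
      if pvRole m == "system" then processed
      else if pvRole m == "assistant" && processed.isEmpty then processed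
      else processed ++ [m])
    []

-- ===== PORT B =====
-- B helper: the while-loop counting leading assistant messages of the filtered list.
def pvLeadAssist (l : List (List (String × String))) : Nat :=
  match l with
  | [] => 0
  | m :: rest =>
    if pvRole m == "assistant" then pvLeadAssist rest + 1 else 0

def process_openai_messages_py_alt (messages : List (List (String × String))) : List (List (String × String)) :=
  let filtered := messages.filter (fun m => !(pvRole m == "system"))
  filtered.drop (pvLeadAssist filtered)

-- ===== PRECONDITION & SPEC =====
-- Pre_ excludes exactly the messages without a "role" key, on which Python A raises KeyError (B raises too).
def Pre_process_openai_messages_py (messages : List (List (String × String))) : Prop :=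
  ∀ m ∈ messages, ((PySem.Dict.mk m).get? "role").isSome = true
instance (messages : List (List (String × String))) : Decidable (Pre_process_openai_messages_py messages) := by unfold Pre_process_openai_messages_py; infer_instance
def pvWitness_process_openai_messages_py : (List (List (String × String))) :=
  [[("role", "system"), ("content", "s")], [("role", "assistant"), ("content", "a")], [("role", "user"), ("content", "hi")]]

def Spec_process_openai_messages_py (messages : List (List (String × String))) (out : List (List (String × String))) : Prop := out = process_openai_messages_py_alt messages
instance (messages : List (List (String × String))) (out : List (List (String × String))) : Decidable (Spec_process_openai_messages_py messages out) := by unfold Spec_process_openai_messages_py; infer_instance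

-- ===== CLAIM (what is proved, stated in full; the proofs are below) =====
def Claim_equal_process_openai_messages_py : Prop := ∀ (messages : List (List (String × String))), Dom_process_openai_messages_py messages → Pre_process_openai_messages_py messages → Spec_process_openai_messages_py messages (process_openai_messages_py messages)

-- ===== LEMMAS AND PROOFS =====

-- A's loop body, named for the lemmas.
def pvStepA (processed : List (List (String × String))) (m : List (String × String)) : List (List (String × String)) :=
  if pvRole m == "system" then processed
  else if pvRole m == "assistant" && processed.isEmpty then processed
  else processed ++ [m]

lemma pvFoldA_eq (messages : List (List (String × String))) :
    process_openai_messages_py messages = messages.foldl pvStepA [] := rfl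

-- Once the accumulator is non-empty, A only filters out system messages.
lemma pvFoldA_nonempty (messages : List (List (String × String)))
    (acc : List (List (String × String))) (h : acc ≠ []) :
    messages.foldl pvStepA acc
      = acc ++ messages.filter (fun m => !(pvRole m == "system")) := by
  induction messages generalizing acc with
  | nil => simp
  | cons m rest ih =>
    simp only [List.foldl_cons, List.filter_cons, pvStepA]
    by_cases hs : pvRole m == "system"
    · simp [hs, ih acc h]
    · have hne : acc.isEmpty = false := by simpa [List.isEmpty_iff] using h
      simp [hs, hne, ih (acc ++ [m]) (by simp)]

-- Dropping the counted leading-assistant prefix of l, written as a case split.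
lemma pvDrop_cons (m : List (String × String)) (l : List (List (String × String))) :
    (m :: l).drop (pvLeadAssist (m :: l))
      = if pvRole m == "assistant" then l.drop (pvLeadAssist l) else m :: l := by
  by_cases ha : pvRole m == "assistant" <;> simp [pvLeadAssist, ha]

-- With empty accumulator, A computes B's value.
lemma pvFoldA_empty (messages : List (List (String × String))) :
    messages.foldl pvStepA [] = process_openai_messages_py_alt messages := by
  induction messages with
  | nil => rfl
  | cons m rest ih =>
    simp only [process_openai_messages_py_alt, List.filter_cons] at *
    simp only [List.foldl_cons, pvStepA]
    by_cases hs : pvRole m == "system"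
    · simpa [hs] using ih
    · by_cases ha : pvRole m == "assistant"
      · simpa [hs, ha, pvDrop_cons] using ih
      · simp [hs, ha, pvDrop_cons, pvFoldA_nonempty rest [m] (by simp)]

-- ===== VERDICT (by name: the statement is the Claim_ definition above) =====
theorem process_openai_messages_py_spec : Claim_equal_process_openai_messages_py := by
  intro messages _ _
  unfold Spec_process_openai_messages_py
  rw [pvFoldA_eq, pvFoldA_empty]
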